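-- pv_equiv track=rewrite | github.com/jameswnichols/CC-Video | converter.py | getPalette
-- ===== SOURCE A (Python) =====
-- def getPalette(paletteData):
--     actualPalette = []
--     currentRGB = []
--     for value in paletteData:
--         currentRGB.append(value)
--         if len(currentRGB) != 3:
--             continue
--         if currentRGB in actualPalette:
--             currentRGB = []
--             continue
--         actualPalette.append(currentRGB)
--         currentRGB = []
--     return actualPalette
-- ===== SOURCE B (Python) =====
-- def getPalette(paletteData):
--     # Phase 1: group consecutive values into triplets, dropping a trailing partial group.
--     it = iter(paletteData)
--     triplets = [list(t) for t in zip(it, it, it)]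
--     # Phase 2: dedup, keeping first occurrences in order.
--     palette = []
--     for t in triplets:
--         if t not in palette:
--             palette.append(t)
--     return palette
-- ===== Notes on version B (the rewrite author's own statement) =====
-- stated objective: simpler
-- what changed: Replaces A's single interleaved accumulate-check-reset loop over values with a two-phase computation: first group the flat list into triplets (zip over one iterator), then a separate first-seen dedup pass over the triplets.
import Mathlib
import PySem

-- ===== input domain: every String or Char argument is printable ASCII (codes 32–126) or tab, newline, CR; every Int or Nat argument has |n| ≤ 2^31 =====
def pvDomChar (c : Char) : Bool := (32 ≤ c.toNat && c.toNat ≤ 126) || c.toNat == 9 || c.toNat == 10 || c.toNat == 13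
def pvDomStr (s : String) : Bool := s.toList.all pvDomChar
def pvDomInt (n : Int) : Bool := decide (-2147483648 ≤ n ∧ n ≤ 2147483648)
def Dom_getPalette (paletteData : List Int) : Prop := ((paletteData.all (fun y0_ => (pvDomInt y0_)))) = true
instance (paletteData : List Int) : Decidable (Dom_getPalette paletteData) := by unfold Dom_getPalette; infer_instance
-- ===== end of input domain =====

-- ===== PORT A =====
-- B splits A's interleaved accumulate-and-dedup loop into a grouping phase then a dedup phase (objective: simpler).
def getPaletteStep (st : List (List Int) × List Int) (value : Int) : List (List Int) × List Int :=
  let currentRGB := st.2 ++ [value]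
  if currentRGB.length ≠ 3 then (st.1, currentRGB)
  else if currentRGB ∈ st.1 then (st.1, [])
  else (st.1 ++ [currentRGB], [])

def getPalette (paletteData : List Int) : List (List Int) :=
  (paletteData.foldl getPaletteStep ([], [])).1

-- ===== PORT B =====
def chunk3 : List Int → List (List Int)
  | a :: b :: c :: rest => [a, b, c] :: chunk3 rest
  | _ => []

def getPalette_alt (paletteData : List Int) : List (List Int) :=
  (chunk3 paletteData).foldl (fun palette t => if t ∈ palette then palette else palette ++ [t]) []

-- ===== PRECONDITION & SPEC =====
def Spec_getPalette (paletteData : List Int) (out : List (List Int)) : Prop := out = getPalette_alt paletteData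
instance (paletteData : List Int) (out : List (List Int)) : Decidable (Spec_getPalette paletteData out) := by unfold Spec_getPalette; infer_instance

-- ===== CLAIM (what is proved, stated in full; the proofs are below) =====
def Claim_equal_getPalette : Prop := ∀ (paletteData : List Int), Dom_getPalette paletteData → Spec_getPalette paletteData (getPalette paletteData)

-- ===== LEMMAS AND PROOFS =====
def tail3 : List Int → List Int
  | _ :: _ :: _ :: rest => tail3 rest
  | l => l

theorem getPalette_loop (l : List Int) (acc : List (List Int)) :
    l.foldl getPaletteStep (acc, []) =
      ((chunk3 l).foldl (fun palette t => if t ∈ palette then palette else palette ++ [t]) acc,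
        tail3 l) := by
  induction l using chunk3.induct generalizing acc with
  | case1 a b c rest ih =>
      have h1 : getPaletteStep (acc, []) a = (acc, [a]) := by
        simp [getPaletteStep]
      have h2 : getPaletteStep (acc, [a]) b = (acc, [a, b]) := by
        simp [getPaletteStep]
      have h3 : getPaletteStep (acc, [a, b]) c =
          (if [a, b, c] ∈ acc then acc else acc ++ [[a, b, c]], []) := by
        simp [getPaletteStep]
        split_ifs <;> simp_all
      simp only [List.foldl_cons, h1, h2, h3]
      rcases h : decide ([a, b, c] ∈ acc) with _ | _
      · have hm : [a, b, c] ∉ acc := by simpa using h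
        simp only [if_neg hm, ih]
        simp [chunk3, tail3, if_neg hm]
      · have hm : [a, b, c] ∈ acc := by simpa using h
        simp only [if_pos hm, ih]
        simp [chunk3, tail3, if_pos hm]
  | case2 l h1 =>
      -- l has fewer than 3 elements
      match l with
      | [] => simp [chunk3, tail3]
      | [a] =>
          simp [chunk3, tail3, getPaletteStep]
      | [a, b] =>
          simp [chunk3, tail3, getPaletteStep]
      | a :: b :: c :: rest => exact absurd rfl (h1 a b c rest)

-- ===== VERDICT (by name: the statement is the Claim_ definition above) =====
theorem getPalette_spec : Claim_equal_getPalette := by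
  intro l _
  unfold Spec_getPalette getPalette getPalette_alt
  rw [getPalette_loop]
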